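-- pv_equiv track=rewrite | github.com/fixxxera/Laina | Scripts/azamara.py | split_europe
-- ===== SOURCE A (Python) =====
-- def split_europe(ports, dn, dc):
--     baltic = ['Petropavlovsk', 'Bergen', 'Flam', 'Geiranger', 'Alesund',
--               'Stavanger', 'Skjolden', 'Stockholm', 'Helsinki, Finland',
--               'St. Petersburg', 'Tallinn', 'Riga', 'Warnemunde',
--               'Copenhagen', 'Kristiansand', 'Skagen', 'Fredericia',
--               'Rostock (Berlin)', 'Nynashamn', 'Oslo', 'Amsterdam',
--               'Reykjavik',
--               'Zeebrugge (Brussels), Belgium', 'Southampton']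
--     eastern_med = ['Athens (Piraeus)', 'Limassol, Cyprus', 'Katakolon', 'Dubrovnik', 'Mykonos',
--                    'Rhodes', 'Chania (Souda)', 'Crete', 'Koper, Slovenia', 'Split',
--                    'Santorini', 'Zadar', 'Corfu', 'Kotor']
--     west_med = ['Catania,Sicily', 'Ajaccio, Corsica', 'Alicante', 'Barcelona', 'Bilbao',
--                 'Cadiz', 'Cannes', 'Cartagena', 'Florence / Pisa (Livorno)',
--                 'Fuerteventura, Canary', 'Funchal (Madeira)', 'Genoa', 'Gibraltar',
--                 'Ibiza', 'La Coruna', 'La Spezia', 'Lanzarote, Canary Islands',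
--                 'Las Palmas, Gran Canaria', 'Lisbon', 'Malaga', 'Marseille',
--                 'Messina (Sicily)', 'Montecarlo', 'Naples', 'Nice (Villefranche)',
--                 'Palma De Mallorca', 'Ponta Delgada, Azores', 'Portofino', 'Provence (Toulon)',
--                 'Ravenna', 'Sete', 'St. Peter Port, Channel Isl', 'Tenerife, Canary Islands',
--                 'Valencia', 'Valletta', 'Venice', 'Vigo']
--     europe = ['Rome (Civitavecchia)', 'Le Havre (Paris)', 'Akureyri',
--               'Belfast, Northern Ireland', 'Cherbourg', 'Cork (Cobh)', 'Dover',
--               'Dublin', 'Edinburgh', 'Greenock (Glasgow)', 'Inverness/Loch Ness',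
--               'Lerwick/Shetland', 'Liverpool',
--               'Waterford (Dunmore E.)']
--
--     ports_visited = ports
--
--     ports_list = []
--     for i in range(len(ports_visited)):
--
--         if i == 0:
--             pass
--         else:
--             ports_list.append(ports_visited[i])
--     for element in baltic:
--         for p in ports_list:
--             if p in element or element in p:
--                 return ['Baltic', 'E']
--             elif ports_visited[0] in element or element in ports_visited[0]:
--                 return ['Baltic', 'E']
--
--     for element in eastern_med:
--         for p in ports_list:
--             if p in element or element in p:
--                 return ['Eastern Med', 'E']
--
--     for element in west_med:
--         for p in ports_list:
--             if p in element or element in p: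
--                 return ['Western Med', 'E']
--     for element in europe:
--         for p in ports_list:
--             if p in element or element in p:
--                 return ['Europe', 'E']
--
--     return ['Europe', 'E']
-- ===== SOURCE B (Python) =====
-- def split_europe(ports, dn, dc):
--     baltic = ['Petropavlovsk', 'Bergen', 'Flam', 'Geiranger', 'Alesund',
--               'Stavanger', 'Skjolden', 'Stockholm', 'Helsinki, Finland',
--               'St. Petersburg', 'Tallinn', 'Riga', 'Warnemunde',
--               'Copenhagen', 'Kristiansand', 'Skagen', 'Fredericia',
--               'Rostock (Berlin)', 'Nynashamn', 'Oslo', 'Amsterdam',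
--               'Reykjavik',
--               'Zeebrugge (Brussels), Belgium', 'Southampton']
--     eastern_med = ['Athens (Piraeus)', 'Limassol, Cyprus', 'Katakolon', 'Dubrovnik', 'Mykonos',
--                    'Rhodes', 'Chania (Souda)', 'Crete', 'Koper, Slovenia', 'Split',
--                    'Santorini', 'Zadar', 'Corfu', 'Kotor']
--     west_med = ['Catania,Sicily', 'Ajaccio, Corsica', 'Alicante', 'Barcelona', 'Bilbao',
--                 'Cadiz', 'Cannes', 'Cartagena', 'Florence / Pisa (Livorno)',
--                 'Fuerteventura, Canary', 'Funchal (Madeira)', 'Genoa', 'Gibraltar',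
--                 'Ibiza', 'La Coruna', 'La Spezia', 'Lanzarote, Canary Islands',
--                 'Las Palmas, Gran Canaria', 'Lisbon', 'Malaga', 'Marseille',
--                 'Messina (Sicily)', 'Montecarlo', 'Naples', 'Nice (Villefranche)',
--                 'Palma De Mallorca', 'Ponta Delgada, Azores', 'Portofino', 'Provence (Toulon)',
--                 'Ravenna', 'Sete', 'St. Peter Port, Channel Isl', 'Tenerife, Canary Islands',
--                 'Valencia', 'Valletta', 'Venice', 'Vigo']
--     # With fewer than two ports nothing is ever compared.
--     if len(ports) < 2:
--         return ['Europe', 'E']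
--     # One flattened catalog tagging each entry with its region's priority rank
--     # (0 = Baltic, 1 = Eastern Med, 2 = Western Med; 3 = the default, Europe).
--     # The original 'europe' list is omitted: a match there yields the same
--     # value as the default, so it cannot influence the result.
--     names = [['Baltic', 'E'], ['Eastern Med', 'E'], ['Western Med', 'E'], ['Europe', 'E']]
--     catalog = ([(e, 0) for e in baltic] + [(e, 1) for e in eastern_med]
--                + [(e, 2) for e in west_med])
--     # Single pass over the ports (outer) keeping the best (lowest) rank seen;
--     # the first port participates only in rank-0 (Baltic) comparisons.
--     best = 3
--     for i, p in enumerate(ports):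
--         for e, rank in catalog:
--             if (i > 0 or rank == 0) and (p in e or e in p) and rank < best:
--                 best = rank
--     return names[best]
-- ===== Notes on version B (the rewrite author's own statement) =====
-- stated objective: alternative
-- what changed: Replaces A's cascade of four early-return nested region-by-region scans by one flattened catalog tagging every entry with a priority rank, a single ports-outer pass keeping the running minimum rank (the first port only joins rank-0 comparisons), a final table lookup, and dropping the 'europe' list entirely since a match there equals the default.
import Mathlib
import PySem

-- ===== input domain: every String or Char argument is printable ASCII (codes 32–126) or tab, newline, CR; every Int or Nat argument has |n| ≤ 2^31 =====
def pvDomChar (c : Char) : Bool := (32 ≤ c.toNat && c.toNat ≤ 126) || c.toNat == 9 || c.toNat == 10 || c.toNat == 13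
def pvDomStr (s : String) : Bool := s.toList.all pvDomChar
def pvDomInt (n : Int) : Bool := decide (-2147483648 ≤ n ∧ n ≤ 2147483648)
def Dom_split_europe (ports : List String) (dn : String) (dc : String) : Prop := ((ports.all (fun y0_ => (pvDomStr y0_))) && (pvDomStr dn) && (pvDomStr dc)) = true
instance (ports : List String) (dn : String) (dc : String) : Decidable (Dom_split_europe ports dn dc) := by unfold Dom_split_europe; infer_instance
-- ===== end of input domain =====

-- B replaces A's cascade of early-return region-by-region scans by one flattened
-- rank-tagged catalog, a single ports-outer running-minimum pass, and a table lookup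
-- (objective: alternative; the return value is proved equal on the stated domain).


-- the shared region lists
def pvBaltic : List String := ["Petropavlovsk", "Bergen", "Flam", "Geiranger", "Alesund",
  "Stavanger", "Skjolden", "Stockholm", "Helsinki, Finland",
  "St. Petersburg", "Tallinn", "Riga", "Warnemunde",
  "Copenhagen", "Kristiansand", "Skagen", "Fredericia",
  "Rostock (Berlin)", "Nynashamn", "Oslo", "Amsterdam",
  "Reykjavik",
  "Zeebrugge (Brussels), Belgium", "Southampton"]
def pvEasternMed : List String := ["Athens (Piraeus)", "Limassol, Cyprus", "Katakolon", "Dubrovnik", "Mykonos",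
  "Rhodes", "Chania (Souda)", "Crete", "Koper, Slovenia", "Split",
  "Santorini", "Zadar", "Corfu", "Kotor"]
def pvWestMed : List String := ["Catania,Sicily", "Ajaccio, Corsica", "Alicante", "Barcelona", "Bilbao",
  "Cadiz", "Cannes", "Cartagena", "Florence / Pisa (Livorno)",
  "Fuerteventura, Canary", "Funchal (Madeira)", "Genoa", "Gibraltar",
  "Ibiza", "La Coruna", "La Spezia", "Lanzarote, Canary Islands",
  "Las Palmas, Gran Canaria", "Lisbon", "Malaga", "Marseille",
  "Messina (Sicily)", "Montecarlo", "Naples", "Nice (Villefranche)",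
  "Palma De Mallorca", "Ponta Delgada, Azores", "Portofino", "Provence (Toulon)",
  "Ravenna", "Sete", "St. Peter Port, Channel Isl", "Tenerife, Canary Islands",
  "Valencia", "Valletta", "Venice", "Vigo"]
def pvEurope : List String := ["Rome (Civitavecchia)", "Le Havre (Paris)", "Akureyri",
  "Belfast, Northern Ireland", "Cherbourg", "Cork (Cobh)", "Dover",
  "Dublin", "Edinburgh", "Greenock (Glasgow)", "Inverness/Loch Ness",
  "Lerwick/Shetland", "Liverpool",
  "Waterford (Dunmore E.)"]

-- 'p in element or element in p'
def pvMatch (p e : String) : Bool := PySem.Str.isIn p e || PySem.Str.isIn e p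

-- ===== PORT A =====
-- inner 'for p in ports_list' of the baltic loop; ports_visited[0] is evaluated only
-- inside the loop body, where ports is necessarily nonempty, so getD "" is never the none case
def pvAInnerBaltic (ports : List String) (e : String) : List String → Option (List String)
  | [] => none
  | p :: ps =>
    if pvMatch p e then some ["Baltic", "E"]
    else if pvMatch ((PySem.List.pyGet? ports 0).getD "") e then some ["Baltic", "E"]
    else pvAInnerBaltic ports e ps

-- 'for element in baltic' loop
def pvALoopBaltic (ports pl : List String) : List String → Option (List String)
  | [] => none
  | e :: es =>
    match pvAInnerBaltic ports e pl with
    | some r => some r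
    | none => pvALoopBaltic ports pl es

-- inner 'for p in ports_list' of the three remaining region loops
def pvAInner (e : String) (ret : List String) : List String → Option (List String)
  | [] => none
  | p :: ps => if pvMatch p e then some ret else pvAInner e ret ps

-- 'for element in <region>' loop
def pvALoop (pl : List String) (ret : List String) : List String → Option (List String)
  | [] => none
  | e :: es =>
    match pvAInner e ret pl with
    | some r => some r
    | none => pvALoop pl ret es

def split_europe (ports : List String) (dn : String) (dc : String) : List String :=
  let ports_visited := ports
  -- 'for i in range(len(ports_visited)): if i == 0: pass else: ports_list.append(ports_visited[i])'
  let ports_list := (PySem.List.enumerate ports_visited).foldl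
    (fun acc ip => if ip.1 = 0 then acc else acc ++ [ip.2]) []
  match pvALoopBaltic ports_visited ports_list pvBaltic with
  | some r => r
  | none =>
    match pvALoop ports_list ["Eastern Med", "E"] pvEasternMed with
    | some r => r
    | none =>
      match pvALoop ports_list ["Western Med", "E"] pvWestMed with
      | some r => r
      | none =>
        match pvALoop ports_list ["Europe", "E"] pvEurope with
        | some r => r
        | none => ["Europe", "E"]

-- ===== PORT B =====
-- names[rank] for the four priority ranks
def pvNames : List (List String) :=
  [["Baltic", "E"], ["Eastern Med", "E"], ["Western Med", "E"], ["Europe", "E"]]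

-- the flattened catalog: every entry tagged with its region's priority rank
def pvCatalog : List (String × Nat) :=
  pvBaltic.map (fun e => (e, 0)) ++ pvEasternMed.map (fun e => (e, 1))
    ++ pvWestMed.map (fun e => (e, 2))

def split_europe_alt (ports : List String) (dn : String) (dc : String) : List String :=
  if ports.length < 2 then ["Europe", "E"]
  else
    -- 'for i, p in enumerate(ports): for e, rank in catalog: if (i > 0 or rank == 0)
    --  and (p in e or e in p) and rank < best: best = rank'
    let best : Nat := (PySem.List.enumerate ports).foldl
      (fun b ip => pvCatalog.foldl
        (fun b er =>
          if (decide (0 < ip.1) || er.2 == 0) && pvMatch ip.2 er.1 && decide (er.2 < b)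
          then er.2 else b) b) 3
    -- 'names[best]'; best ≤ 3 always, so the getD default is never taken
    (PySem.List.pyGet? pvNames (best : Int)).getD ["Europe", "E"]

-- ===== PRECONDITION & SPEC =====
def Spec_split_europe (ports : List String) (dn : String) (dc : String) (out : List String) : Prop := out = split_europe_alt ports dn dc
instance (ports : List String) (dn : String) (dc : String) (out : List String) : Decidable (Spec_split_europe ports dn dc out) := by unfold Spec_split_europe; infer_instance

-- ===== CLAIM (what is proved, stated in full; the proofs are below) =====
def Claim_equal_split_europe : Prop := ∀ (ports : List String) (dn : String) (dc : String), Dom_split_europe ports dn dc → Spec_split_europe ports dn dc (split_europe ports dn dc)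

-- ===== LEMMAS AND PROOFS =====

-- per-port region hits and the rank a single (non-first) port contributes
def pvHitB (p : String) : Bool := pvBaltic.any (fun e => pvMatch p e)
def pvHitE (p : String) : Bool := pvEasternMed.any (fun e => pvMatch p e)
def pvHitW (p : String) : Bool := pvWestMed.any (fun e => pvMatch p e)
def pvRank (p : String) : Nat :=
  if pvHitB p then 0 else if pvHitE p then 1 else if pvHitW p then 2 else 3

-- ---- A-side characterisations ----
theorem pvAInner_eq (e : String) (ret pl : List String) :
    pvAInner e ret pl = if pl.any (fun p => pvMatch p e) then some ret else none := by
  induction pl with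
  | nil => simp [pvAInner]
  | cons p ps ih =>
    simp only [pvAInner, List.any_cons, ih]
    by_cases h : pvMatch p e <;> simp [h]

theorem pvALoop_eq (pl ret es : List String) :
    pvALoop pl ret es = if es.any (fun e => pl.any (fun p => pvMatch p e)) then some ret else none := by
  induction es with
  | nil => simp [pvALoop]
  | cons e es ih =>
    simp only [pvALoop, List.any_cons, pvAInner_eq, ih]
    by_cases h : pl.any (fun p => pvMatch p e) <;> simp [h]

theorem pvAInnerBaltic_eq (ports : List String) (e : String) (pl : List String) :
    pvAInnerBaltic ports e pl =
      if pl.any (fun p => pvMatch p e)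
          || (!pl.isEmpty && pvMatch ((PySem.List.pyGet? ports 0).getD "") e)
        then some ["Baltic", "E"] else none := by
  induction pl with
  | nil => simp [pvAInnerBaltic]
  | cons p ps ih =>
    simp only [pvAInnerBaltic, List.any_cons, ih]
    by_cases h : pvMatch p e
    · simp [h]
    · by_cases h0 : pvMatch ((PySem.List.pyGet? ports 0).getD "") e <;> simp [h, h0]

theorem pvALoopBaltic_eq (ports pl es : List String) :
    pvALoopBaltic ports pl es =
      if es.any (fun e => pl.any (fun p => pvMatch p e)
          || (!pl.isEmpty && pvMatch ((PySem.List.pyGet? ports 0).getD "") e))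
        then some ["Baltic", "E"] else none := by
  induction es with
  | nil => simp [pvALoopBaltic]
  | cons e es ih =>
    simp only [pvALoopBaltic, List.any_cons, pvAInnerBaltic_eq, ih]
    by_cases h : (pl.any (fun p => pvMatch p e)
        || (!pl.isEmpty && pvMatch ((PySem.List.pyGet? ports 0).getD "") e)) = true <;>
      simp [h]

-- the index-loop copy of ports[1:] really is the tail
theorem pvPortsList_eq (ports : List String) :
    (PySem.List.enumerate ports).foldl
      (fun acc ip => if ip.1 = 0 then acc else acc ++ [ip.2]) [] = ports.drop 1 := by
  cases ports with
  | nil => simp [PySem.List.enumerate]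
  | cons x xs =>
    simp only [PySem.List.enumerate_cons, List.foldl_cons, List.drop_one, List.tail_cons]
    have key : ∀ (l : List String) (s : Int) (acc : List String), 1 ≤ s →
        (PySem.List.enumerate l s).foldl
          (fun acc ip => if ip.1 = 0 then acc else acc ++ [ip.2]) acc = acc ++ l := by
      intro l
      induction l with
      | nil => intro s acc _; simp [PySem.List.enumerate]
      | cons y ys ih =>
        intro s acc hs
        have hne : s ≠ 0 := by omega
        simp only [PySem.List.enumerate_cons, List.foldl_cons, if_neg hne]
        rw [ih (s + 1) (acc ++ [y]) (by omega)]
        simp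
    simpa using key xs 1 [] le_rfl

-- swapping the two any's
theorem pvAnyOr {β : Type} (M : List β) (p q : β → Bool) :
    M.any (fun b => p b || q b) = (M.any p || M.any q) := by
  induction M with
  | nil => simp
  | cons b M ih => cases hp : p b <;> cases hq : q b <;> simp [hp, hq, ih]

theorem pvAnySwap {α β : Type} (L : List α) (M : List β) (f : β → α → Bool) :
    L.any (fun a => M.any (fun b => f b a)) = M.any (fun b => L.any (fun a => f b a)) := by
  induction L with
  | nil => simp
  | cons a L ih =>
    simp only [List.any_cons, ih, pvAnyOr]

-- ---- B-side characterisations ----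
-- the inner fold over one rank-k mapped block
theorem pvFoldMapRank (L : List String) (k : Nat) (c : Bool) (p : String) (b : Nat) :
    (L.map (fun e => (e, k))).foldl
      (fun b er => if (c || er.2 == 0) && pvMatch p er.1 && decide (er.2 < b)
        then er.2 else b) b
    = if (c || k == 0) && L.any (fun e => pvMatch p e) && decide (k < b) then k else b := by
  induction L generalizing b with
  | nil => simp
  | cons e L ih =>
    simp only [List.map_cons, List.foldl_cons, List.any_cons, ih]
    by_cases hg : (c || k == 0) = true
    · by_cases hm : pvMatch p e = true
      · by_cases hkb : k < b
        · simp [hg, hm, hkb]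
        · simp [hg, hm, hkb]
      · simp [hg, hm]
    · simp [hg]

-- the whole catalog fold for one port, guard c = (i > 0)
theorem pvCatFold (c : Bool) (p : String) (b : Nat) :
    pvCatalog.foldl
      (fun b er => if (c || er.2 == 0) && pvMatch p er.1 && decide (er.2 < b)
        then er.2 else b) b
    = (fun b2 => if c && pvHitW p && decide (2 < b2) then 2 else b2)
      ((fun b1 => if c && pvHitE p && decide (1 < b1) then 1 else b1)
        (if pvHitB p && decide (0 < b) then 0 else b)) := by
  simp only [pvCatalog, List.foldl_append, pvFoldMapRank, pvHitB, pvHitE, pvHitW]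
  norm_num

-- catalog fold for a non-first port = running minimum with its rank
theorem pvCatFoldPos (p : String) (b : Nat) (hb : b ≤ 3) :
    pvCatalog.foldl
      (fun b er => if (true || er.2 == 0) && pvMatch p er.1 && decide (er.2 < b)
        then er.2 else b) b = min b (pvRank p) := by
  rw [pvCatFold]
  unfold pvRank
  by_cases h0 : pvHitB p <;> by_cases h1 : pvHitE p <;> by_cases h2 : pvHitW p <;>
    simp [h0, h1, h2] <;> (try split_ifs) <;> omega

-- catalog fold for the first port (i = 0): only Baltic participates
theorem pvCatFoldFirst (p : String) (b : Nat) :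
    pvCatalog.foldl
      (fun b er => if (false || er.2 == 0) && pvMatch p er.1 && decide (er.2 < b)
        then er.2 else b) b = if pvHitB p && decide (0 < b) then 0 else b := by
  rw [pvCatFold]
  simp

-- the outer fold over the enumerated tail is a plain rank-min fold
theorem pvOuterFold (l : List String) : ∀ (s : Int) (b : Nat), 1 ≤ s → b ≤ 3 →
    (PySem.List.enumerate l s).foldl
      (fun b ip => pvCatalog.foldl
        (fun b er => if (decide (0 < ip.1) || er.2 == 0) && pvMatch ip.2 er.1 && decide (er.2 < b)
          then er.2 else b) b) b
    = l.foldl (fun b p => min b (pvRank p)) b := by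
  induction l with
  | nil => intro s b _ _; simp [PySem.List.enumerate]
  | cons p l ih =>
    intro s b hs hb
    have hc : decide (0 < s) = true := by simp; omega
    simp only [PySem.List.enumerate_cons, List.foldl_cons, hc, pvCatFoldPos p b hb]
    exact ih (s + 1) _ (by omega) (le_trans (Nat.min_le_left _ _) hb)

-- the rank-min fold computes the priority if-chain
theorem pvMinFold (l : List String) : ∀ b : Nat, b ≤ 3 →
    l.foldl (fun b p => min b (pvRank p)) b
    = min b (if l.any pvHitB then 0 else if l.any pvHitE then 1
        else if l.any pvHitW then 2 else 3) := by
  induction l with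
  | nil => intro b hb; simp; omega
  | cons p l ih =>
    intro b hb
    simp only [List.foldl_cons, List.any_cons]
    rw [ih _ (le_trans (Nat.min_le_left _ _) hb)]
    unfold pvRank
    by_cases h0 : pvHitB p <;> by_cases h1 : pvHitE p <;> by_cases h2 : pvHitW p <;>
      simp [h0, h1, h2] <;> (try split_ifs) <;> omega

-- ===== VERDICT (by name: the statement is the Claim_ definition above) =====
theorem split_europe_spec : Claim_equal_split_europe := by
  intro ports dn dc _
  show split_europe ports dn dc = split_europe_alt ports dn dc
  match ports with
  | [] => simp [split_europe, split_europe_alt, pvALoopBaltic_eq, pvALoop_eq]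
  | [p0] => simp [split_europe, split_europe_alt, pvALoopBaltic_eq, pvALoop_eq]
  | p0 :: p1 :: rest =>
    have hlen : ¬ ((p0 :: p1 :: rest).length < 2) := by simp
    have hnn : (0 : Int) ≤ (rest.length : Int) + 1 := by positivity
    have hget : (PySem.List.pyGet? (p0 :: p1 :: rest) 0).getD "" = p0 := by
      simp [PySem.List.pyGet?, PySem.List.pyIdx?, hnn]
    -- A's baltic condition over ports[1:] plus ports[0] = per-port hits
    have hb2 : (pvBaltic.any fun e => ((p1 :: rest).any fun p => pvMatch p e) || pvMatch p0 e)
        = ((p1 :: rest).any pvHitB || pvHitB p0) := by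
      rw [pvAnyOr]
      congr 1
      exact pvAnySwap pvBaltic (p1 :: rest) (fun p e => pvMatch p e)
    have hE2 : (pvEasternMed.any fun e => (p1 :: rest).any fun p => pvMatch p e)
        = (p1 :: rest).any pvHitE :=
      pvAnySwap pvEasternMed (p1 :: rest) (fun p e => pvMatch p e)
    have hW2 : (pvWestMed.any fun e => (p1 :: rest).any fun p => pvMatch p e)
        = (p1 :: rest).any pvHitW :=
      pvAnySwap pvWestMed (p1 :: rest) (fun p e => pvMatch p e)
    -- B's side: first port then the tail
    have hBfold : (PySem.List.enumerate (p0 :: p1 :: rest)).foldl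
        (fun b ip => pvCatalog.foldl
          (fun b er => if (decide (0 < ip.1) || er.2 == 0) && pvMatch ip.2 er.1 && decide (er.2 < b)
            then er.2 else b) b) 3
        = min (if pvHitB p0 then 0 else 3)
            (if (p1 :: rest).any pvHitB then 0 else if (p1 :: rest).any pvHitE then 1
              else if (p1 :: rest).any pvHitW then 2 else 3) := by
      simp only [PySem.List.enumerate_cons (x := p0), List.foldl_cons]
      have hc0 : decide ((0 : Int) < 0) = false := by decide
      rw [show (fun (b : Nat) (er : String × Nat) =>
            if (decide ((0:Int) < 0) || er.2 == 0) && pvMatch p0 er.1 && decide (er.2 < b)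
            then er.2 else b)
          = (fun (b : Nat) (er : String × Nat) =>
            if (false || er.2 == 0) && pvMatch p0 er.1 && decide (er.2 < b)
            then er.2 else b) from by funext b er; rw [hc0]]
      rw [pvCatFoldFirst]
      have hb0 : (if pvHitB p0 && decide (0 < 3) then 0 else 3)
          = (if pvHitB p0 then 0 else 3) := by norm_num
      rw [hb0, pvOuterFold (p1 :: rest) (0 + 1) (if pvHitB p0 then 0 else 3) (by norm_num)
        (by split_ifs <;> omega),
      pvMinFold (p1 :: rest) (if pvHitB p0 then 0 else 3) (by split_ifs <;> omega)]
    simp only [split_europe, pvPortsList_eq, pvALoopBaltic_eq, pvALoop_eq, List.drop_one,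
      List.tail_cons, List.isEmpty_cons, Bool.not_false, Bool.true_and, hget, hb2, hE2, hW2,
      split_europe_alt, if_neg hlen, hBfold]
    by_cases c0 : pvHitB p0 <;> by_cases c1 : (p1 :: rest).any pvHitB <;>
      by_cases c2 : (p1 :: rest).any pvHitE <;> by_cases c3 : (p1 :: rest).any pvHitW <;>
      simp only [c0, c1, c2, c3, Bool.or_true, Bool.or_false, if_true] <;>
      (first | rfl | (split_ifs <;> rfl))
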